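-- pv_equiv track=rewrite | github.com/antoine-gajan/UTC-INF2 | TP2/Exercice 3 - Sécurité mot de passe.py | LongMin
-- ===== SOURCE A (Python) =====
-- def LongMin(password:str) -> int:
--
--     #On initialise la plus longue séquence max à 0
--     maxNumber = 0
--     # On initialise la séquence de traitement à 0
--     currentNumber = 0
--
--
--     #On étudie chaque caractère du mdp
--     for char in password:
--         if char.islower():
--             # Si le caractère est en miniscule on ajoute 1 la la séquence en cours
--             currentNumber = currentNumber+1
--         else:
--             # Si le caractère n'est pas en miniscule (nombre, caractère spécial ou maj) la séquence est finie
--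
--             if currentNumber > maxNumber:
--                 # Si la séquence actuelle est plus longue que la séquence maximale on change la longueur de la séquence la plus longue
--                 maxNumber = currentNumber
--             #On remet à 0 la séquence en cours de traitement
--             currentNumber = 0
--
--     # À la fin de l'execution, on force la fin de la dernière séquence, et on retraite comme ci-dessus
--     if currentNumber > maxNumber:
--         maxNumber = currentNumber
--
--     return maxNumber
-- ===== SOURCE B (Python) =====
-- def LongMin(password: str) -> int:
--     # Run-skipping scan: find each maximal lowercase run in one inner scan and jump past it.
--     best = 0
--     rest = password
--     while rest:
--         if rest[0].islower():
--             run = 1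
--             while run < len(rest) and rest[run].islower():
--                 run += 1
--             if run > best:
--                 best = run
--             rest = rest[run:]
--         else:
--             rest = rest[1:]
--     return best
-- ===== Notes on version B (the rewrite author's own statement) =====
-- stated objective: alternative
-- what changed: replaces A's counter-with-reset accumulator (current/max pair updated per character, with a final flush) by run-skipping: each maximal lowercase run is measured by an inner scan and skipped in one jump, keeping only the best length
import Mathlib
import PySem

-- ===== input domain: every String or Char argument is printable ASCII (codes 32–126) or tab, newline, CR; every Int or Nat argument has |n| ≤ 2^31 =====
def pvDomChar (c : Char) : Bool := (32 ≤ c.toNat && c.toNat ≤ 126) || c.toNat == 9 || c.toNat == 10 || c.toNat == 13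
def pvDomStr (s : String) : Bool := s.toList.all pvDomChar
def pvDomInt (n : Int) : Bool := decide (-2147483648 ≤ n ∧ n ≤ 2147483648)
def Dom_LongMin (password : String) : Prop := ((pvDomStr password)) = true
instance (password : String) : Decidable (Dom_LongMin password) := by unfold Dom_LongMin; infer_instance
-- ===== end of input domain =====

-- B replaces A's counter-with-reset accumulator by run-skipping (measure each maximal lowercase run and jump past it); same O(n) cost, alternative structure.


-- ===== PORT A =====
-- for char in password: keep (maxNumber, currentNumber); final flush after the loop.
def LongMinStep (st : Int × Int) (ch : Char) : Int × Int :=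
  if PySem.Chars.islower ch then (st.1, st.2 + 1)
  else (if st.2 > st.1 then st.2 else st.1, 0)

def LongMin (password : String) : Int :=
  let st := password.toList.foldl LongMinStep (0, 0)
  if st.2 > st.1 then st.2 else st.1

-- ===== PORT B =====
-- while rest: if rest[0].islower(): inner scan of the run (takeWhile), skip past it (dropWhile); else drop one char.
def LongMinAltGo (best : Int) : List Char → Int
  | [] => best
  | c :: cs =>
    if PySem.Chars.islower c then
      let run : Int := 1 + ((cs.takeWhile (fun d => PySem.Chars.islower d)).length : Int)
      LongMinAltGo (if run > best then run else best) (cs.dropWhile (fun d => PySem.Chars.islower d))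
    else
      LongMinAltGo best cs
termination_by l => l.length
decreasing_by
  · simpa using Nat.lt_succ_of_le (List.length_dropWhile_le _ _)
  · simp

def LongMin_alt (password : String) : Int := LongMinAltGo 0 password.toList

-- ===== PRECONDITION & SPEC =====
def Spec_LongMin (password : String) (out : Int) : Prop := out = LongMin_alt password
instance (password : String) (out : Int) : Decidable (Spec_LongMin password out) := by unfold Spec_LongMin; infer_instance

-- ===== CLAIM (what is proved, stated in full; the proofs are below) =====
def Claim_equal_LongMin : Prop := ∀ (password : String), Dom_LongMin password → Spec_LongMin password (LongMin password)

-- ===== LEMMAS AND PROOFS =====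

-- length of the leading lowercase run, as an Int
def leadRun (l : List Char) : Int := ((l.takeWhile (fun d => PySem.Chars.islower d)).length : Int)

theorem leadRun_nonneg (l : List Char) : 0 ≤ leadRun l := by
  simp [leadRun]

-- B absorbs the leading run: starting at any suffix equals recording its leading run and skipping it.
theorem altGo_absorb (l : List Char) (best : Int) (hb : 0 ≤ best) :
    LongMinAltGo best l =
      LongMinAltGo (max best (leadRun l)) (l.dropWhile (fun d => PySem.Chars.islower d)) := by
  cases l with
  | nil =>
    have h0 : leadRun ([] : List Char) = 0 := by simp [leadRun]
    rw [h0, List.dropWhile_nil]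
    have : max best 0 = best := by omega
    rw [this]
  | cons c cs =>
    by_cases h : PySem.Chars.islower c = true
    · have hlead : leadRun (c :: cs) = 1 + leadRun cs := by
        simp [leadRun, h]; ring
      have hdrop : (c :: cs).dropWhile (fun d => PySem.Chars.islower d)
          = cs.dropWhile (fun d => PySem.Chars.islower d) := by
        simp [h]
      rw [hlead, hdrop]
      simp only [LongMinAltGo, h, if_true]
      congr 1
      have := leadRun_nonneg cs
      unfold leadRun at *
      split_ifs <;> omega
    · simp only [Bool.not_eq_true] at h
      have hlead : leadRun (c :: cs) = 0 := by
        simp [leadRun, h]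
      have hdrop : (c :: cs).dropWhile (fun d => PySem.Chars.islower d) = c :: cs := by
        simp [h]
      rw [hlead, hdrop]
      have : max best 0 = best := by omega
      rw [this]

-- Main invariant: A's fold state (m, c) finishes like B running from the skipped suffix,
-- with the current run c extended by the leading lowercase run of the rest.
theorem fold_eq_altGo (l : List Char) (m c : Int) (hm : 0 ≤ m) (hc : 0 ≤ c) :
    (let st := l.foldl LongMinStep (m, c); if st.2 > st.1 then st.2 else st.1) =
      LongMinAltGo (max m (c + leadRun l)) (l.dropWhile (fun d => PySem.Chars.islower d)) := by
  induction l generalizing m c with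
  | nil =>
    have h0 : leadRun ([] : List Char) = 0 := by simp [leadRun]
    rw [h0, List.dropWhile_nil]
    simp only [List.foldl_nil, LongMinAltGo]
    split_ifs <;> omega
  | cons x xs ih =>
    by_cases h : PySem.Chars.islower x = true
    · have hlead : leadRun (x :: xs) = 1 + leadRun xs := by
        simp [leadRun, h]; ring
      have hdrop : (x :: xs).dropWhile (fun d => PySem.Chars.islower d)
          = xs.dropWhile (fun d => PySem.Chars.islower d) := by
        simp [h]
      rw [hlead, hdrop]
      simp only [List.foldl_cons, LongMinStep, h, if_true]
      rw [ih m (c + 1) hm (by omega)]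
      congr 1
      omega
    · simp only [Bool.not_eq_true] at h
      have hlead : leadRun (x :: xs) = 0 := by
        simp [leadRun, h]
      have hdrop : (x :: xs).dropWhile (fun d => PySem.Chars.islower d) = x :: xs := by
        simp [h]
      rw [hlead, hdrop]
      have hstep : LongMinStep (m, c) x = (max m c, 0) := by
        simp only [LongMinStep, h, Bool.false_eq_true, if_false]
        have : (if c > m then c else m) = max m c := by split_ifs <;> omega
        rw [this]
      simp only [List.foldl_cons, hstep]
      rw [ih (max m c) 0 (by omega) le_rfl]
      have hB : LongMinAltGo (max m (c + 0)) (x :: xs) = LongMinAltGo (max m c) xs := by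
        have : max m (c + 0) = max m c := by omega
        rw [this]
        simp [LongMinAltGo, h]
      rw [hB, altGo_absorb xs (max m c) (by omega)]
      congr 1
      omega

-- ===== VERDICT (by name: the statement is the Claim_ definition above) =====
theorem LongMin_spec : Claim_equal_LongMin := by
  intro password _
  unfold Spec_LongMin LongMin LongMin_alt
  rw [fold_eq_altGo password.toList 0 0 le_rfl le_rfl]
  rw [altGo_absorb password.toList 0 le_rfl]
  congr 1
  omega
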